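-- pv_equiv track=rewrite | github.com/Bejter/Functions | Zadanie7.py | f
-- ===== SOURCE A (Python) =====
-- from collections import Counter
-- from collections import Counter
--
-- def f(number):
--     str_number = str(number)
--
--     digit_count = Counter(str_number)
--
--     total_sum = 0
--
--     for digit, count in digit_count.items():
--         if count > 1:
--             total_sum += int(digit) * (count - 1)
--
--     return total_sum
-- ===== SOURCE B (Python) =====
-- def f(number):
--     total = 0
--     seen = set()
--     for c in str(number):
--         if c in seen:
--             total += int(c)
--         else:
--             seen.add(c)
--     return total
-- ===== Notes on version B (the rewrite author's own statement) =====
-- stated objective: simpler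
-- what changed: Replaces the build-Counter-then-loop-over-items structure with a single pass over str(number) that adds int(c) whenever a character was already seen, so the second loop over distinct digits disappears.
import Mathlib
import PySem

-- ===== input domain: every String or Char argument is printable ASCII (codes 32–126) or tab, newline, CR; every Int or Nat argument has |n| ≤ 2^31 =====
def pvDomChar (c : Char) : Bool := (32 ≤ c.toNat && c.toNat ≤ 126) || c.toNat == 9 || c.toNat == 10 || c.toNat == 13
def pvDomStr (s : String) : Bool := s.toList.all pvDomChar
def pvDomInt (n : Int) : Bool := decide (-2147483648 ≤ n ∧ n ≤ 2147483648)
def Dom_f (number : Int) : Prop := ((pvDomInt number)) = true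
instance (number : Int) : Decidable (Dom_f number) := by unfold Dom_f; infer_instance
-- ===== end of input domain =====

-- B is a simpler one-pass rewrite: it accumulates int(c) on each repeated character of
-- str(number) instead of building a Counter and then looping over its items.

-- int(digit) for a one-character string; the .getD 0 default is unreachable in A's loop
-- (the branch requires count > 1, and the only non-digit character of str(number), '-',
-- occurs at most once) and likewise in B (a non-digit character never repeats).
def pvVal (c : Char) : Int := (PySem.Int.ofChars? [c]).getD 0

-- ===== PORT A =====
def f (number : Int) : Int :=
  let str_number : List Char := (PySem.Int.toStr number).toList
  let digit_count : PySem.Dict Char Int := PySem.Dict.counter str_number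
  digit_count.items.foldl
    (fun total_sum p => if p.2 > 1 then total_sum + pvVal p.1 * (p.2 - 1) else total_sum) 0

-- ===== PORT B =====
-- one iteration of B's loop: on a repeat add int(c) to the total, otherwise record c as seen
def pvStep (st : PySem.Set Char × Int) (c : Char) : PySem.Set Char × Int :=
  if c ∈ st.1 then (st.1, st.2 + pvVal c) else (PySem.Set.add st.1 c, st.2)

def f_alt (number : Int) : Int :=
  ((PySem.Int.toStr number).toList.foldl pvStep (PySem.Set.empty, 0)).2

-- ===== PRECONDITION & SPEC =====
def Spec_f (number : Int) (out : Int) : Prop := out = f_alt number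
instance (number : Int) (out : Int) : Decidable (Spec_f number out) := by unfold Spec_f; infer_instance

-- ===== CLAIM (what is proved, stated in full; the proofs are below) =====
def Claim_equal_f : Prop := ∀ (number : Int), Dom_f number → Spec_f number (f number)

-- ===== LEMMAS AND PROOFS =====

-- the two loops applied to an arbitrary character list
def pvA (s : List Char) : Int :=
  (PySem.Dict.counter s).items.foldl
    (fun total_sum p => if p.2 > 1 then total_sum + pvVal p.1 * (p.2 - 1) else total_sum) 0

def pvB (s : List Char) : Int :=
  (s.foldl pvStep (PySem.Set.empty, 0)).2

-- sum form of A's loop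
def pvS (s : List Char) : Int :=
  ((PySem.Set.ofList s).map (fun k => pvVal k * ((s.count k : Int) - 1))).sum

lemma pv_sum_filter (l : List (Char × Int)) (p : Char × Int → Bool) (g : Char × Int → Int)
    (h : ∀ x ∈ l, p x = false → g x = 0) :
    ((l.filter p).map g).sum = (l.map g).sum := by
  induction l with
  | nil => simp
  | cons a t ih =>
    by_cases hp : p a = true
    · simp [hp, ih (fun x hx => h x (List.mem_cons_of_mem _ hx))]
    · simp only [Bool.not_eq_true] at hp
      simp [hp, h a List.mem_cons_self hp,
        ih (fun x hx => h x (List.mem_cons_of_mem _ hx))]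

lemma pv_sum_map_ite (l : List Char) (c : Char) (v : Int) :
    (l.map (fun k => if k = c then v else 0)).sum = (l.count c : Int) * v := by
  induction l with
  | nil => simp
  | cons a t ih =>
    by_cases h : a = c <;> simp [h, ih] <;> ring

lemma pvA_eq_pvS (s : List Char) : pvA s = pvS s := by
  unfold pvA pvS
  rw [PySem.Dict.items_counter,
    PySem.List.foldl_ite_eq_foldl_filter (p := fun p : Char × Int => p.2 > 1)
      (f := fun total_sum p => total_sum + pvVal p.1 * (p.2 - 1)),
    PySem.List.foldl_add (g := fun p : Char × Int => pvVal p.1 * (p.2 - 1))]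
  rw [pv_sum_filter _ _ _ ?_, List.map_map]
  · simp [Function.comp_def]
  · intro x hx hfalse
    obtain ⟨k, hk, rfl⟩ := List.mem_map.mp hx
    have hks : k ∈ s := (PySem.Set.mem_ofList _ _).mp hk
    have h1 : 1 ≤ s.count k := List.one_le_count_iff.mpr hks
    simp only [decide_eq_false_iff_not, not_lt] at hfalse
    have : (s.count k : Int) = 1 := by omega
    simp [this]

-- A's sum form obeys the append-one-character recurrence
lemma pvS_append (s : List Char) (c : Char) :
    pvS (s ++ [c]) = pvS s + (if c ∈ s then pvVal c else 0) := by
  unfold pvS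
  rw [PySem.Set.ofList_append_singleton]
  by_cases hc : c ∈ s
  · have hmem : c ∈ PySem.Set.ofList s := (PySem.Set.mem_ofList _ _).mpr hc
    rw [PySem.Set.add_of_mem hmem]
    have hsplit : ∀ k : Char,
        pvVal k * (((s ++ [c]).count k : Int) - 1)
          = pvVal k * ((s.count k : Int) - 1) + (if k = c then pvVal c else 0) := by
      intro k
      by_cases hk : k = c
      · subst hk; simp [List.count_append]; ring
      · have hck : c ≠ k := fun h => hk h.symm
        simp [List.count_append, hk, hck]
    calc ((PySem.Set.ofList s).map (fun k => pvVal k * (((s ++ [c]).count k : Int) - 1))).sum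
        = ((PySem.Set.ofList s).map
            (fun k => pvVal k * ((s.count k : Int) - 1) + (if k = c then pvVal c else 0))).sum := by
          exact congrArg _ (List.map_congr_left (fun k _ => hsplit k))
      _ = ((PySem.Set.ofList s).map (fun k => pvVal k * ((s.count k : Int) - 1))).sum
            + ((PySem.Set.ofList s).map (fun k => if k = c then pvVal c else 0)).sum :=
          PySem.List.sum_map_add_int _ _ _
      _ = _ := by
          rw [pv_sum_map_ite]
          have : (PySem.Set.ofList s).count c = 1 :=
            List.count_eq_one_of_mem (PySem.Set.nodup_ofList s) hmem
          simp [hc]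
  · have hmem : c ∉ PySem.Set.ofList s := fun h => hc ((PySem.Set.mem_ofList _ _).mp h)
    rw [PySem.Set.add_of_not_mem hmem]
    have hcount0 : s.count c = 0 := List.count_eq_zero.mpr hc
    rw [List.map_append, List.sum_append]
    simp only [List.map_cons, List.map_nil, List.sum_cons, List.sum_nil]
    have hlast : pvVal c * (((s ++ [c]).count c : Int) - 1) = 0 := by
      simp [List.count_append, hcount0]
    rw [hlast]
    have hrest : ∀ k ∈ PySem.Set.ofList s,
        pvVal k * (((s ++ [c]).count k : Int) - 1) = pvVal k * ((s.count k : Int) - 1) := by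
      intro k hk
      have hkc : k ≠ c := fun h => hmem (h ▸ hk)
      have hck : c ≠ k := fun h => hkc h.symm
      simp [List.count_append, hck]
    rw [List.map_congr_left hrest]
    simp [hc]

-- the first component of B's fold is the set of characters seen so far
lemma pvB_fst (s : List Char) : ∀ (seen : PySem.Set Char) (t : Int),
    (s.foldl pvStep (seen, t)).1 = s.foldl PySem.Set.add seen := by
  induction s with
  | nil => intro seen t; rfl
  | cons a rest ih =>
    intro seen t
    by_cases h : a ∈ seen
    · simp [List.foldl_cons, pvStep, h, ih]
    · simp [List.foldl_cons, pvStep, h, ih]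

-- B obeys the same recurrence
lemma pvB_append (s : List Char) (c : Char) :
    pvB (s ++ [c]) = pvB s + (if c ∈ s then pvVal c else 0) := by
  unfold pvB
  rw [List.foldl_append]
  simp only [List.foldl_cons, List.foldl_nil]
  have hset : (s.foldl pvStep (PySem.Set.empty, 0)).1 = PySem.Set.ofList s := by
    rw [pvB_fst]; rfl
  by_cases h : c ∈ s
  · have hmem : c ∈ (s.foldl pvStep (PySem.Set.empty, 0)).1 := by
      rw [hset]; exact (PySem.Set.mem_ofList _ _).mpr h
    simp only [pvStep]
    rw [if_pos hmem, if_pos h]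
  · have hmem : c ∉ (s.foldl pvStep (PySem.Set.empty, 0)).1 := by
      rw [hset]; exact fun hm => h ((PySem.Set.mem_ofList _ _).mp hm)
    simp only [pvStep]
    rw [if_neg hmem, if_neg h]
    simp

lemma pvA_eq_pvB (s : List Char) : pvA s = pvB s := by
  induction s using List.reverseRecOn with
  | nil => rfl
  | append_singleton t c ih =>
    rw [pvA_eq_pvS, pvS_append, ← pvA_eq_pvS, ih, pvB_append]

-- ===== VERDICT (by name: the statement is the Claim_ definition above) =====
theorem f_spec : Claim_equal_f := by
  intro number _
  unfold Spec_f f f_alt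
  exact pvA_eq_pvB ((PySem.Int.toStr number).toList)
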